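-- pv_equiv track=rewrite | github.com/yannansoda/DeutschNest | utils.py | cloze_deletion
-- ===== SOURCE A (Python) =====
-- from typing import List, Dict
--
-- def cloze_deletion(sentence: str, lemma_list: List[str]) -> str:
--     """创建遮词填空"""
--     if not lemma_list:
--         return sentence
--
--     # 选择要遮住的词（优先选择较长的词）
--     words = sentence.split()
--     if not words:
--         return sentence
--
--     # 尝试找到 lemma 对应的词
--     candidate_words = []
--     for word in words:
--         word_clean = word.strip('.,!?;:()[]{}"\'')
--         if word_clean.lower() in [lemma.lower() for lemma in lemma_list]:
--             candidate_words.append((word, len(word_clean)))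
--
--     if candidate_words:
--         # 选择最长的词
--         word_to_replace = max(candidate_words, key=lambda x: x[1])[0]
--     else:
--         # 如果没有匹配，随机选择一个较长的词
--         word_to_replace = max(words, key=lambda x: len(x.strip('.,!?;:()[]{}"\'')))
--
--     return sentence.replace(word_to_replace, "___", 1)
-- ===== SOURCE B (Python) =====
-- def cloze_deletion(sentence: str, lemma_list: list) -> str:
--     """Single composite-key max over the words, with a precomputed lowercase lemma set."""
--     if not lemma_list:
--         return sentence
--     words = sentence.split()
--     if not words:
--         return sentence
--     lemma_set = {lemma.lower() for lemma in lemma_list}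
--
--     def key(word):
--         cleaned = word.strip('.,!?;:()[]{}"\'')
--         return (cleaned.lower() in lemma_set, len(cleaned))
--
--     word_to_replace = max(words, key=key)
--     return sentence.replace(word_to_replace, "___", 1)
-- ===== Notes on version B (the rewrite author's own statement) =====
-- stated objective: simpler
-- what changed: B replaces A's candidate-list build plus if/else two-stage max by a single max over the words with a composite (is-lemma, cleaned-length) key, using a precomputed lowercase lemma set.
import Mathlib
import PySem

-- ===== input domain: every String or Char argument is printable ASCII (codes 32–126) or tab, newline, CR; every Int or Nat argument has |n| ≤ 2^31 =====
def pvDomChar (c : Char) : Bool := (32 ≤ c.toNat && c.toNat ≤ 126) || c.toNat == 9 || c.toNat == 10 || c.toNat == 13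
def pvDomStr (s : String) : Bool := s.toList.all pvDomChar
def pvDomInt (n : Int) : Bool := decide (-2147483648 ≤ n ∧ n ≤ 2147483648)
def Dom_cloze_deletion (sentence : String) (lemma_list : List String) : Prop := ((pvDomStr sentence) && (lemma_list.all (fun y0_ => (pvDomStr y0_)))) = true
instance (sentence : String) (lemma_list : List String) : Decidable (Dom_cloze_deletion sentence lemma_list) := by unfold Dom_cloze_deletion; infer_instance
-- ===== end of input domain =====

-- B replaces A's candidate-list build plus if/else branch by one composite-key max over the
-- words with a precomputed lowercase lemma set (objective: simpler).

-- ===== PORT A =====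
-- shared helper: word.strip('.,!?;:()[]{}"\'') — both Pythons call the same .strip
def clozeClean (w : String) : String := PySem.Str.stripChars w ".,!?;:()[]{}\"'"

-- shared helper: len of the cleaned word, the length key both Pythons use
def clozeKeyLen (w : String) : Int := PySem.Str.len (clozeClean w)

-- shared helper: s.replace(old, new, 1) — replace the FIRST occurrence only (exact:
-- first occurrence located by PySem.Chars.find; old = '' inserts new in front, as CPython)
def replaceOnce (s old new : String) : String :=
  let cs := s.toList
  let o := old.toList
  let i := PySem.Chars.find cs o
  if i < 0 then s else String.ofList (cs.take i.toNat ++ new.toList ++ cs.drop (i.toNat + o.length))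

def cloze_deletion (sentence : String) (lemma_list : List String) : String :=
  if lemma_list = [] then sentence
  else
    let words := PySem.Str.split₀ sentence
    if words = [] then sentence
    else
      let candidates : List (String × Int) := words.foldl (fun acc word =>
        let wordClean := clozeClean word
        if PySem.Str.lower wordClean ∈ lemma_list.map PySem.Str.lower
        then acc ++ [(word, PySem.Str.len wordClean)] else acc) []
      let wordToReplace :=
        match PySem.List.max? candidates (fun c => c.2) with
        | some c => c.1
        | none => (PySem.List.max? words clozeKeyLen).getD sentence
          -- getD never fires: words ≠ [] here, so max? returns some (totalisation only)
      replaceOnce sentence wordToReplace "___"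

-- ===== PORT B =====
def cloze_deletion_alt (sentence : String) (lemma_list : List String) : String :=
  if lemma_list = [] then sentence
  else
    let words := PySem.Str.split₀ sentence
    if words = [] then sentence
    else
      let lemmaSet := PySem.Set.ofList (lemma_list.map PySem.Str.lower)
      match PySem.List.max2? words
          (fun w => decide (PySem.Str.lower (clozeClean w) ∈ lemmaSet))
          clozeKeyLen with
      | some w => replaceOnce sentence w "___"
      | none => sentence

-- ===== PRECONDITION & SPEC =====
def Spec_cloze_deletion (sentence : String) (lemma_list : List String) (out : String) : Prop := out = cloze_deletion_alt sentence lemma_list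
instance (sentence : String) (lemma_list : List String) (out : String) : Decidable (Spec_cloze_deletion sentence lemma_list out) := by unfold Spec_cloze_deletion; infer_instance

-- ===== CLAIM (what is proved, stated in full; the proofs are below) =====
def Claim_equal_cloze_deletion : Prop := ∀ (sentence : String) (lemma_list : List String), Dom_cloze_deletion sentence lemma_list → Spec_cloze_deletion sentence lemma_list (cloze_deletion sentence lemma_list)

-- ===== LEMMAS AND PROOFS =====

-- one right-append step of Python max(xs, key=…)
theorem pvMax?_append {α κ : Type} [LT κ] [DecidableLT κ] (xs : List α) (x : α) (key : α → κ) :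
    PySem.List.max? (xs ++ [x]) key =
      (match PySem.List.max? xs key with
       | none => some x
       | some m => if key m < key x then some x else some m) := by
  simp only [PySem.List.max?, List.foldl_append, List.foldl]
  rfl

-- one right-append step of Python max(xs, key=tuple)
theorem pvMax2?_append {α κ₁ κ₂ : Type} [LT κ₁] [DecidableLT κ₁] [LT κ₂] [DecidableLT κ₂]
    (xs : List α) (x : α) (k1 : α → κ₁) (k2 : α → κ₂) :
    PySem.List.max2? (xs ++ [x]) k1 k2 =
      (match PySem.List.max2? xs k1 k2 with
       | none => some x
       | some m => if (decide (k1 m < k1 x) || !decide (k1 x < k1 m) && decide (k2 m < k2 x)) = true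
                   then some x else some m) := by
  simp only [PySem.List.max2?, List.foldl_append, List.foldl]
  rfl

-- the selection invariant: the composite-key max agrees with A's two-stage selection
theorem pvSelInv {α : Type} (p : α → Bool) (f : α → Int) (ws : List α) :
    (ws.filter p = [] → PySem.List.max2? ws p f = PySem.List.max? ws f) ∧
    (ws.filter p ≠ [] → ∃ m, PySem.List.max2? ws p f = some m ∧ p m = true ∧
       PySem.List.max? ((ws.filter p).map (fun w => (w, f w))) (fun c => c.2) = some (m, f m)) := by
  induction ws using List.reverseRecOn with
  | nil => exact ⟨fun _ => rfl, fun h => absurd rfl h⟩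
  | append_singleton ws x ih =>
    obtain ⟨ih1, ih2⟩ := ih
    by_cases hx : p x = true
    · -- x is a candidate
      have hfilt : List.filter p (ws ++ [x]) = List.filter p ws ++ [x] := by
        simp [List.filter_append, hx]
      rw [hfilt]
      refine ⟨fun h => absurd h (by simp), fun _ => ?_⟩
      by_cases hws : ws.filter p = []
      · -- first candidate ever
        refine ⟨x, ?_, hx, ?_⟩
        · rw [pvMax2?_append, ih1 hws]
          rcases hm : PySem.List.max? ws f with _ | m
          · rfl
          · have hmem := PySem.List.max?_mem hm
            have hpm : p m = false := by
              have := List.filter_eq_nil_iff.mp hws m hmem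
              simpa using this
            simp [hpm, hx]
        · simp [hws, PySem.List.max?]
      · -- candidates already exist
        obtain ⟨m, hB, hpm, hA⟩ := ih2 hws
        rw [pvMax2?_append, hB]
        simp only [List.map_append, List.map_cons, List.map_nil]
        rw [pvMax?_append, hA]
        simp only [hpm, hx]
        by_cases hlt : f m < f x
        · exact ⟨x, by simp [hlt], hx, by simp [hlt]⟩
        · exact ⟨m, by simp [hlt], hpm, by simp [hlt]⟩
    · -- x is not a candidate
      have hx' : p x = false := by simpa using hx
      have hfilt : List.filter p (ws ++ [x]) = List.filter p ws := by
        simp [List.filter_append, hx']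
      rw [hfilt]
      constructor
      · intro hws
        rw [pvMax2?_append, pvMax?_append, ih1 hws]
        rcases hm : PySem.List.max? ws f with _ | m
        · rfl
        · have hmem := PySem.List.max?_mem hm
          have hpm : p m = false := by
            have := List.filter_eq_nil_iff.mp hws m hmem
            simpa using this
          simp [hpm, hx']
      · intro hws
        obtain ⟨m, hB, hpm, hA⟩ := ih2 hws
        rw [pvMax2?_append, hB]
        exact ⟨m, by simp [hpm, hx'], hpm, hA⟩

-- bridge: on a nonempty word list the two selection pipelines pick the same word
theorem pvBranch (sentence : String) (lemma_list : List String) (words : List String)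
    (hw : words ≠ []) :
    (let candidates : List (String × Int) := words.foldl (fun acc word =>
        let wordClean := clozeClean word
        if PySem.Str.lower wordClean ∈ lemma_list.map PySem.Str.lower
        then acc ++ [(word, PySem.Str.len wordClean)] else acc) []
     let wordToReplace :=
       match PySem.List.max? candidates (fun c => c.2) with
       | some c => c.1
       | none => (PySem.List.max? words clozeKeyLen).getD sentence
     replaceOnce sentence wordToReplace "___")
    = (match PySem.List.max2? words
          (fun w => decide (PySem.Str.lower (clozeClean w) ∈
            PySem.Set.ofList (lemma_list.map PySem.Str.lower)))
          clozeKeyLen with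
       | some w => replaceOnce sentence w "___"
       | none => sentence) := by
  have hcand : words.foldl (fun acc word =>
        let wordClean := clozeClean word
        if PySem.Str.lower wordClean ∈ lemma_list.map PySem.Str.lower
        then acc ++ [(word, PySem.Str.len wordClean)] else acc) ([] : List (String × Int))
      = [] ++ (words.filter
          (fun w => decide (PySem.Str.lower (clozeClean w) ∈ lemma_list.map PySem.Str.lower))).map
          (fun w => (w, clozeKeyLen w)) :=
    PySem.List.foldl_append_ite
      (fun word => PySem.Str.lower (clozeClean word) ∈ lemma_list.map PySem.Str.lower)
      (fun word => (word, clozeKeyLen word)) words []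
  have hpB : (fun w => decide (PySem.Str.lower (clozeClean w) ∈
        PySem.Set.ofList (lemma_list.map PySem.Str.lower)))
      = (fun w => decide (PySem.Str.lower (clozeClean w) ∈ lemma_list.map PySem.Str.lower)) := by
    funext w
    simp [PySem.Set.mem_ofList]
  show replaceOnce sentence
      (match PySem.List.max? (words.foldl (fun acc word =>
          let wordClean := clozeClean word
          if PySem.Str.lower wordClean ∈ lemma_list.map PySem.Str.lower
          then acc ++ [(word, PySem.Str.len wordClean)] else acc) []) (fun c => c.2) with
       | some c => c.1
       | none => (PySem.List.max? words clozeKeyLen).getD sentence) "___" = _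
  rw [hcand, hpB]
  obtain ⟨inv1, inv2⟩ := pvSelInv
    (fun w => decide (PySem.Str.lower (clozeClean w) ∈ lemma_list.map PySem.Str.lower))
    clozeKeyLen words
  by_cases hf : words.filter
      (fun w => decide (PySem.Str.lower (clozeClean w) ∈ lemma_list.map PySem.Str.lower)) = []
  · rw [hf, inv1 hf]
    rcases hm : PySem.List.max? words clozeKeyLen with _ | m
    · exact absurd ((PySem.List.max?_eq_none_iff _ _).mp hm) hw
    · rfl
  · obtain ⟨m, hB, _, hA⟩ := inv2 hf
    rw [List.nil_append] at hcand ⊢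
    rw [hB, hA]

-- ===== VERDICT (by name: the statement is the Claim_ definition above) =====
theorem cloze_deletion_spec : Claim_equal_cloze_deletion := by
  intro sentence lemma_list _
  unfold Spec_cloze_deletion cloze_deletion cloze_deletion_alt
  by_cases hl : lemma_list = []
  · rw [if_pos hl, if_pos hl]
  · rw [if_neg hl, if_neg hl]
    by_cases hw : PySem.Str.split₀ sentence = []
    · rw [if_pos hw, if_pos hw]
    · rw [if_neg hw, if_neg hw]
      exact pvBranch sentence lemma_list (PySem.Str.split₀ sentence) hw
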